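-- pv_equiv track=rewrite | github.com/vickyzayats/disfluency_detection | util/preprocessing.py | get_phones_mappings
-- ===== SOURCE A (Python) =====
-- def get_phones_mappings(sentences):
--     phoneset = {"PADDING":0, "UNKNOWN":1}
--     for s in sentences:
--         for w in s['phones']:
--             for ph in w:
--                 if not ph in phoneset:
--                     phoneset[ph] = len(phoneset)
--     return phoneset
-- ===== SOURCE B (Python) =====
-- def get_phones_mappings(sentences):
--     # Flatten the phone stream once.
--     flat = [ph for s in sentences for w in s['phones'] for ph in w]
--     # Scan backwards, overwriting: each phone ends up mapped to its FIRST
--     # occurrence position, with no membership test at all.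
--     first = {}
--     for i, ph in reversed(list(enumerate(flat))):
--         first[ph] = i
--     first.pop('PADDING', None)
--     first.pop('UNKNOWN', None)
--     # Sort the distinct phones by first-occurrence position and number them.
--     result = {'PADDING': 0, 'UNKNOWN': 1}
--     for j, ph in enumerate(sorted(first, key=first.get)):
--         result[ph] = j + 2
--     return result
-- ===== Notes on version B (the rewrite author's own statement) =====
-- stated objective: alternative
-- what changed: Replaces A's fused membership-test-and-append dict loop with an index-based algorithm: flatten the phone stream, compute each phone's first-occurrence position by a single backward overwrite pass (no membership test), drop the reserved tokens, then sort the distinct phones by that position and number them from 2.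
import Mathlib
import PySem

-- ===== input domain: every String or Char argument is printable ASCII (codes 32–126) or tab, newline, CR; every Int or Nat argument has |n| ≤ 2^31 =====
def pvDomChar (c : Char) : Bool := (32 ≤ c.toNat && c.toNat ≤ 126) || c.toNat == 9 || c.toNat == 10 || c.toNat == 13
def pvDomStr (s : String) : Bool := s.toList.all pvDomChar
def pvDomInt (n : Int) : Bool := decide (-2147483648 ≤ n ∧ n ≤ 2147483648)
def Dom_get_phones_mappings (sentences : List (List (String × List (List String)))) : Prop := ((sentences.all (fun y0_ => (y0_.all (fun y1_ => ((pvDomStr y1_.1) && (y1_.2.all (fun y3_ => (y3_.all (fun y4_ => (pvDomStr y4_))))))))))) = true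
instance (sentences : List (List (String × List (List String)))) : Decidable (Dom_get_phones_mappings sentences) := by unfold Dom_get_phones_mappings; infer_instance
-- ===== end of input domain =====

-- B replaces A's fused membership-test-and-append dict loop with an index-based algorithm:
-- flatten the phone stream, compute first-occurrence positions by one backward overwrite pass,
-- drop the reserved tokens, sort the distinct phones by position and number them from 2.

-- ===== PORT A =====
-- s['phones'] (first-match lookup; a missing key is Python's KeyError, excluded by Pre_ — the
-- `.getD []` total form is only reached outside Pre_).
def pvPhones (s : List (String × List (List String))) : List (List String) :=
  (PySem.Dict.get? (PySem.Dict.mk s) "phones").getD []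

-- one phone: `if not ph in phoneset: phoneset[ph] = len(phoneset)` — membership is key membership,
-- assignment of a NEW key appends the pair, len(phoneset) is the current item count.
def phStep (ps : List (String × Int)) (ph : String) : List (String × Int) :=
  if ps.any (fun p => p.1 == ph) then ps else ps ++ [(ph, PySem.List.len ps)]

def get_phones_mappings (sentences : List (List (String × List (List String)))) : List (String × Int) :=
  sentences.foldl (fun phoneset s =>
    (pvPhones s).foldl (fun ps w => w.foldl phStep ps) phoneset)
    [("PADDING", 0), ("UNKNOWN", 1)]

-- ===== PORT B =====
def get_phones_mappings_alt (sentences : List (List (String × List (List String)))) : List (String × Int) :=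
  -- flat = [ph for s in sentences for w in s['phones'] for ph in w]
  let flat := sentences.flatMap (fun s => (pvPhones s).flatten)
  -- for i, ph in reversed(list(enumerate(flat))): first[ph] = i
  let first := ((PySem.List.enumerate flat 0).reverse).foldl
      (fun d p => d.insert p.2 p.1) PySem.Dict.empty
  -- first.pop('PADDING', None); first.pop('UNKNOWN', None)  (return value discarded = erase)
  let first := (first.erase "PADDING").erase "UNKNOWN"
  -- sorted(first, key=first.get)  (every key is present in first, so first.get = getD _ 0 here)
  let ordered := PySem.List.sorted first.keys (fun k => first.getD k 0) false
  -- result = {'PADDING': 0, 'UNKNOWN': 1}; for j, ph in enumerate(ordered): result[ph] = j + 2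
  ((PySem.List.enumerate ordered 0).foldl
      (fun res p => res.insert p.2 (p.1 + 2))
      (PySem.Dict.ofList [("PADDING", 0), ("UNKNOWN", 1)])).items

-- ===== PRECONDITION & SPEC =====
-- Pre_: every sentence dict has the key 'phones'; on a sentence without it Python A (and B) raise KeyError.
def Pre_get_phones_mappings (sentences : List (List (String × List (List String)))) : Prop :=
  ∀ s ∈ sentences, (PySem.Dict.mk s).contains "phones" = true
instance (sentences : List (List (String × List (List String)))) : Decidable (Pre_get_phones_mappings sentences) := by unfold Pre_get_phones_mappings; infer_instance

def pvWitness_get_phones_mappings : (List (List (String × List (List String)))) :=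
  [[("phones", [["AA", "B"], ["AA"]])]]

def Spec_get_phones_mappings (sentences : List (List (String × List (List String)))) (out : List (String × Int)) : Prop := out = get_phones_mappings_alt sentences
instance (sentences : List (List (String × List (List String)))) (out : List (String × Int)) : Decidable (Spec_get_phones_mappings sentences out) := by unfold Spec_get_phones_mappings; infer_instance

-- ===== CLAIM (what is proved, stated in full; the proofs are below) =====
def Claim_equal_get_phones_mappings : Prop := ∀ (sentences : List (List (String × List (List String)))), Dom_get_phones_mappings sentences → Pre_get_phones_mappings sentences → Spec_get_phones_mappings sentences (get_phones_mappings sentences)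

-- ===== LEMMAS AND PROOFS =====

-- `ph not in ('PADDING', 'UNKNOWN')` — proof-side notion only
def pvGood (ph : String) : Bool := ph != "PADDING" && ph != "UNKNOWN"

-- both results as a function of the ordered dedup of the good phones
def enumMap (seen : List String) : List (String × Int) :=
  (PySem.List.enumerate seen 0).map (fun p => (p.2, p.1 + 2))

lemma length_enumMap (seen : List String) : (enumMap seen).length = seen.length := by
  simp [enumMap]

lemma keys_enumMap (seen : List String) :
    (enumMap seen).map Prod.fst = seen := by
  have h := PySem.List.map_snd_enumerate seen 0
  simp [enumMap, List.map_map]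
  exact h

lemma enumMap_append_singleton (seen : List String) (ph : String) :
    enumMap (seen ++ [ph]) = enumMap seen ++ [(ph, (seen.length : Int) + 2)] := by
  simp [enumMap, PySem.List.enumerate_append, PySem.List.enumerate]

-- ---- A side (A's fused loop reaches base ++ enumMap of the ordered dedup) ----

lemma A_flat (sentences : List (List (String × List (List String)))) (d : List (String × Int)) :
    sentences.foldl (fun ps s => (pvPhones s).foldl (fun ps w => w.foldl phStep ps) ps) d
      = (sentences.flatMap (fun s => (pvPhones s).flatten)).foldl phStep d := by
  induction sentences generalizing d with
  | nil => rfl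
  | cons s rest ih =>
    simp only [List.foldl_cons, List.flatMap_cons, List.foldl_append, ih, List.foldl_flatten]

lemma inv (L : List String) (seen : List String) :
    L.foldl phStep ([("PADDING", 0), ("UNKNOWN", 1)] ++ enumMap seen)
      = [("PADDING", (0:Int)), ("UNKNOWN", 1)] ++ enumMap (PySem.Set.update seen (L.filter pvGood)) := by
  induction L generalizing seen with
  | nil => simp [PySem.Set.update]
  | cons ph L ih =>
    by_cases hg : pvGood ph = true
    · have hne : ph ≠ "PADDING" ∧ ph ≠ "UNKNOWN" := by
        simp [pvGood] at hg; exact hg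
      by_cases hm : ph ∈ seen
      · have hany : (([("PADDING", (0:Int)), ("UNKNOWN", 1)] ++ enumMap seen).any (fun p => p.1 == ph)) = true := by
          rw [List.any_append]
          have : (enumMap seen).any (fun p => p.1 == ph) = true := by
            rw [show (fun (p : String × Int) => p.1 == ph) = (fun k => k == ph) ∘ Prod.fst from rfl,
              ← List.any_map, keys_enumMap]
            simpa using hm
          simp [this]
        have hadd : PySem.Set.add seen ph = seen := by
          simpa [PySem.Set.add] using hm
        have hstep0 : phStep ([("PADDING", (0:Int)), ("UNKNOWN", 1)] ++ enumMap seen) ph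
            = [("PADDING", (0:Int)), ("UNKNOWN", 1)] ++ enumMap seen := by
          simp only [phStep, hany]
          simp
        rw [List.foldl_cons, hstep0, ih]
        simp only [List.filter_cons, hg, if_pos, PySem.Set.update_cons, hadd]
      · have hany : (([("PADDING", (0:Int)), ("UNKNOWN", 1)] ++ enumMap seen).any (fun p => p.1 == ph)) = false := by
          rw [List.any_append]
          have h2 : (enumMap seen).any (fun p => p.1 == ph) = false := by
            rw [show (fun (p : String × Int) => p.1 == ph) = (fun k => k == ph) ∘ Prod.fst from rfl,
              ← List.any_map, keys_enumMap]
            simp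
            intro x hx; exact fun h => (hm (h ▸ hx)).elim
          simp [h2, hne.1.symm, hne.2.symm]
        have hlen : PySem.List.len ([("PADDING", (0:Int)), ("UNKNOWN", 1)] ++ enumMap seen)
            = (seen.length : Int) + 2 := by
          simp [PySem.List.len_eq, length_enumMap]; ring
        have hstep : phStep ([("PADDING", (0:Int)), ("UNKNOWN", 1)] ++ enumMap seen) ph
            = [("PADDING", (0:Int)), ("UNKNOWN", 1)] ++ enumMap (seen ++ [ph]) := by
          simp only [phStep, hany, Bool.false_eq_true, if_false, hlen, enumMap_append_singleton]
          simp
        have hadd : PySem.Set.add seen ph = seen ++ [ph] := by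
          simpa [PySem.Set.add] using hm
        rw [List.foldl_cons, hstep, ih]
        simp only [List.filter_cons, hg, if_pos, PySem.Set.update_cons, hadd]
    · have hph : ph = "PADDING" ∨ ph = "UNKNOWN" := by
        simp [pvGood] at hg
        by_cases h : ph = "PADDING"
        · exact Or.inl h
        · exact Or.inr (hg h)
      have hany : (([("PADDING", (0:Int)), ("UNKNOWN", 1)] ++ enumMap seen).any (fun p => p.1 == ph)) = true := by
        rcases hph with h | h <;> simp [h]
      have hstep0 : phStep ([("PADDING", (0:Int)), ("UNKNOWN", 1)] ++ enumMap seen) ph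
          = [("PADDING", (0:Int)), ("UNKNOWN", 1)] ++ enumMap seen := by
        simp only [phStep, hany]
        simp
      rw [List.foldl_cons, hstep0, ih]
      simp [hg]

-- ---- B side ----

-- the backward overwrite pass records each element's FIRST occurrence position
lemma get?_revfold (flat : List String) (k : String) :
    ∀ (s : Int) (d : PySem.Dict String Int),
    (((PySem.List.enumerate flat s).reverse).foldl (fun d p => d.insert p.2 p.1) d).get? k
      = if k ∈ flat then some (s + (List.idxOf k flat : Int)) else d.get? k := by
  induction flat with
  | nil => intro s d; simp [PySem.List.enumerate]
  | cons x xs ih =>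
    intro s d
    rw [PySem.List.enumerate_cons, List.reverse_cons, List.foldl_append]
    simp only [List.foldl_cons, List.foldl_nil]
    by_cases hk : k = x
    · subst hk
      rw [PySem.Dict.get?_insert_self]
      simp [List.idxOf_cons_self]
    · rw [PySem.Dict.get?_insert_of_ne _ _ hk, ih]
      by_cases hm : k ∈ xs
      · simp only [hm, if_true, List.mem_cons, or_true]
        rw [show List.idxOf k (x :: xs) = List.idxOf k xs + 1 by
          simp [List.idxOf_cons, show (x == k) = false by simp [Ne.symm hk]]]
        push_cast
        ring_nf
      · simp [hm, hk]

-- erasing a different key does not change a lookup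
lemma get?_erase_of_ne (d : PySem.Dict String Int) (k k' : String) (h : k' ≠ k) :
    (d.erase k).get? k' = d.get? k' := by
  obtain ⟨l⟩ := d
  induction l with
  | nil => rfl
  | cons p l ih =>
    rw [show (PySem.Dict.mk (p :: l)).erase k
          = PySem.Dict.mk (List.filter (fun q => !q.1 == k) (p :: l)) from rfl,
      List.filter_cons]
    by_cases hp : p.1 = k
    · rw [if_neg (by simp [hp])]
      rw [PySem.Dict.get?_mk_cons, show (p.1 == k') = false by simp [hp, Ne.symm h]]
      simp only [Bool.false_eq_true, if_false]
      exact ih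
    · rw [if_pos (by simp [hp])]
      rw [PySem.Dict.get?_mk_cons, PySem.Dict.get?_mk_cons]
      by_cases hpk : p.1 = k'
      · simp [hpk]
      · rw [show (p.1 == k') = false by simp [hpk]]
        simp only [Bool.false_eq_true, if_false]
        exact ih

lemma keys_erase (d : PySem.Dict String Int) (k : String) :
    (d.erase k).keys = d.keys.filter (fun x => !(x == k)) := by
  obtain ⟨l⟩ := d
  simp only [PySem.Dict.erase, PySem.Dict.keys]
  rw [List.filter_map]; rfl

-- the ordered dedup of a filtered list is strictly increasing under first-occurrence index
lemma pairwise_idxOf_ofList_filter (xs : List String) (p : String → Bool) :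
    (PySem.Set.ofList (xs.filter p)).Pairwise
      (fun a b => List.idxOf a xs < List.idxOf b xs) := by
  induction xs using List.reverseRecOn with
  | nil => simp [PySem.Set.ofList]
  | append_singleton xs x ih =>
    have hidx : ∀ a ∈ xs, List.idxOf a (xs ++ [x]) = List.idxOf a xs := by
      intro a ha; rw [List.idxOf_append, if_pos ha]
    have hmem : ∀ a ∈ PySem.Set.ofList (xs.filter p), a ∈ xs := by
      intro a ha
      exact List.mem_of_mem_filter ((PySem.Set.mem_ofList _ _).mp ha)
    by_cases hpx : p x = true
    · rw [List.filter_append, List.filter_cons, if_pos hpx, List.filter_nil]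
      rw [show PySem.Set.ofList (xs.filter p ++ [x])
          = PySem.Set.add (PySem.Set.ofList (xs.filter p)) x by
        simp [PySem.Set.ofList_eq_foldl, List.foldl_append]]
      by_cases hx : x ∈ PySem.Set.ofList (xs.filter p)
      · rw [PySem.Set.add_of_mem hx]
        exact ih.imp_of_mem (fun {a b} ha hb hr => by
          rw [hidx a (hmem a ha), hidx b (hmem b hb)]; exact hr)
      · rw [PySem.Set.add_of_not_mem hx]
        rw [List.pairwise_append]
        refine ⟨ih.imp_of_mem (fun {a b} ha hb hr => by
          rw [hidx a (hmem a ha), hidx b (hmem b hb)]; exact hr),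
          List.pairwise_singleton _ _, ?_⟩
        intro a ha b hb
        rw [List.mem_singleton] at hb
        rw [hb]
        have hax : a ∈ xs := hmem a ha
        have hxxs : x ∉ xs := by
          intro hc
          exact hx ((PySem.Set.mem_ofList _ _).mpr (List.mem_filter.mpr ⟨hc, hpx⟩))
        rw [hidx a hax, List.idxOf_append, if_neg hxxs]
        have h1 := List.idxOf_lt_length_of_mem hax
        have h2 : List.idxOf x [x] = 0 := List.idxOf_cons_self
        omega
    · rw [List.filter_append, List.filter_cons, if_neg hpx, List.filter_nil, List.append_nil]
      exact ih.imp_of_mem (fun {a b} ha hb hr => by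
        rw [hidx a (hmem a ha), hidx b (hmem b hb)]; exact hr)

-- ===== VERDICT (by name: the statement is the Claim_ definition above) =====
theorem get_phones_mappings_spec : Claim_equal_get_phones_mappings := by
  intro sentences _ _
  unfold Spec_get_phones_mappings
  set flat := sentences.flatMap (fun s => (pvPhones s).flatten) with hflat
  set u := PySem.Set.ofList (flat.filter pvGood) with hu
  -- A reaches base ++ enumMap u
  have hA : get_phones_mappings sentences
      = [("PADDING", (0:Int)), ("UNKNOWN", 1)] ++ enumMap u := by
    unfold get_phones_mappings
    rw [A_flat, ← hflat]
    have h := inv flat []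
    rw [PySem.Set.update_nil_left, show enumMap [] = [] from rfl, List.append_nil] at h
    rw [h, ← hu]
  -- B's first-occurrence dict
  set F := ((PySem.List.enumerate flat 0).reverse).foldl
      (fun d p => d.insert p.2 p.1) PySem.Dict.empty with hF
  set F2 := (F.erase "PADDING").erase "UNKNOWN" with hF2
  have hget : ∀ k, F.get? k
      = if k ∈ flat then some ((List.idxOf k flat : Int)) else none := by
    intro k
    rw [hF, get?_revfold]
    simp [PySem.Dict.get?_empty]
  have hget2 : ∀ k, k ≠ "PADDING" → k ≠ "UNKNOWN" → F2.get? k = F.get? k := by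
    intro k h1 h2
    rw [hF2, get?_erase_of_ne _ _ _ h2, get?_erase_of_ne _ _ _ h1]
  have hkeysF : F.keys = PySem.Set.ofList flat.reverse := by
    have h := PySem.Dict.keys_foldl_insert_key (ν := Int)
      ((PySem.List.enumerate flat 0).reverse) (fun p => p.2) (fun _ p => p.1)
      PySem.Dict.empty
    rw [List.map_reverse, PySem.List.map_snd_enumerate,
      show (PySem.Dict.empty : PySem.Dict String Int).keys = [] from rfl,
      PySem.Set.update_nil_left] at h
    exact h
  have hkeys2 : F2.keys
      = ((PySem.Set.ofList flat.reverse).filter (fun x => !(x == "PADDING"))).filter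
          (fun x => !(x == "UNKNOWN")) := by
    rw [hF2, keys_erase, keys_erase, hkeysF]
  have hmemK : ∀ a, a ∈ F2.keys ↔ (a ∈ flat ∧ pvGood a = true) := by
    intro a
    rw [hkeys2]
    simp only [List.mem_filter, PySem.Set.mem_ofList, List.mem_reverse, pvGood]
    constructor
    · rintro ⟨⟨h1, h2⟩, h3⟩
      simp at h2 h3
      simp [h1, h2, h3]
    · rintro ⟨h1, h2⟩
      simp at h2
      simp [h1, h2.1, h2.2]
  have hnodK : F2.keys.Nodup := by
    rw [hkeys2]
    exact List.Nodup.filter _ (List.Nodup.filter _ (PySem.Set.nodup_ofList _))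
  have humem : ∀ a ∈ u, a ∈ flat ∧ pvGood a = true := by
    intro a ha
    rw [hu, PySem.Set.mem_ofList, List.mem_filter] at ha
    exact ha
  have hperm : u.Perm F2.keys := by
    rw [List.perm_ext_iff_of_nodup (PySem.Set.nodup_ofList _) hnodK]
    intro a
    rw [hmemK a]
    constructor
    · exact humem a
    · intro ⟨h1, h2⟩
      exact (PySem.Set.mem_ofList _ _).mpr (List.mem_filter.mpr ⟨h1, h2⟩)
  have hkeyval : ∀ a ∈ u, F2.getD a 0 = (List.idxOf a flat : Int) := by
    intro a ha
    obtain ⟨haf, hag⟩ := humem a ha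
    have h12 : a ≠ "PADDING" ∧ a ≠ "UNKNOWN" := by
      simp [pvGood] at hag; exact hag
    rw [PySem.Dict.getD_eq_get?_getD, hget2 a h12.1 h12.2, hget a, if_pos haf]
    rfl
  have hpw : u.Pairwise (fun a b => F2.getD a 0 < F2.getD b 0) := by
    refine (pairwise_idxOf_ofList_filter flat pvGood).imp_of_mem ?_
    intro a b ha hb hr
    rw [← hu] at ha hb
    rw [hkeyval a ha, hkeyval b hb]
    exact_mod_cast hr
  have hsorted : PySem.List.sorted F2.keys (fun k => F2.getD k 0) false = u :=
    PySem.List.sorted_eq_of_perm_of_pairwise_lt _ _ _ hperm hpw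
  -- B's final numbering loop appends fresh keys in order
  have hfresh : ∀ p ∈ PySem.List.enumerate u 0,
      (PySem.Dict.ofList [("PADDING", (0:Int)), ("UNKNOWN", 1)]).contains p.2 = false := by
    intro p hp
    have hp2 : p.2 ∈ u := by
      rw [PySem.List.mem_enumerate_iff] at hp
      obtain ⟨k, hk, rfl⟩ := hp
      exact List.getElem_mem hk
    obtain ⟨_, hag⟩ := humem p.2 hp2
    have h12 : p.2 ≠ "PADDING" ∧ p.2 ≠ "UNKNOWN" := by
      simp [pvGood] at hag; exact hag
    rw [show PySem.Dict.ofList [("PADDING", (0:Int)), ("UNKNOWN", 1)]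
        = PySem.Dict.mk [("PADDING", (0:Int)), ("UNKNOWN", 1)] from by decide]
    simp [PySem.Dict.contains_mk, Ne.symm h12.1, Ne.symm h12.2]
  have hnodE : ((PySem.List.enumerate u 0).map (fun p => p.2)).Nodup := by
    rw [PySem.List.map_snd_enumerate]
    exact PySem.Set.nodup_ofList _
  have hB : get_phones_mappings_alt sentences
      = [("PADDING", (0:Int)), ("UNKNOWN", 1)] ++ enumMap u := by
    have h := PySem.Dict.items_foldl_insert_fresh (PySem.List.enumerate u 0)
      (fun p => p.2) (fun p => p.1 + 2)
      (PySem.Dict.ofList [("PADDING", (0:Int)), ("UNKNOWN", 1)]) hfresh hnodE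
    show ((PySem.List.enumerate (PySem.List.sorted F2.keys (fun k => F2.getD k 0) false) 0).foldl
        (fun res p => res.insert p.2 (p.1 + 2))
        (PySem.Dict.ofList [("PADDING", (0:Int)), ("UNKNOWN", 1)])).items
      = [("PADDING", (0:Int)), ("UNKNOWN", 1)] ++ enumMap u
    rw [hsorted]
    exact h
  rw [hA, hB]
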